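-- pv_equiv track=rewrite | github.com/amirubin87/MA | OmegaIndex.py | IntesectionSize
-- ===== SOURCE A (Python) =====
-- def IntesectionSize(collection1,collection2):
--     '''
--     counts the amount of elements in the intersection of two collections
--     :param collection1: first collection
--     :param collection2: second collection
--     :return: the amount of elements in the intersection of thetwo collections
--     '''
--     if len(collection1) > len(collection2):
--         small = collection2
--         big = collection1
--     else :
--         small = collection1
--         big = collection2
--     ans = 0
--     for comm in small:
--         if comm in big :
--             ans += 1
--     return ans
-- ===== SOURCE B (Python) =====
-- def IntesectionSize(collection1, collection2):
--     '''
--     counts the amount of elements in the intersection of two collections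
--     (sort-and-merge reformulation: two-pointer sweep over sorted small and
--     sorted distinct big)
--     '''
--     if len(collection1) > len(collection2):
--         small, big = collection2, collection1
--     else:
--         small, big = collection1, collection2
--     s = sorted(small)
--     b = sorted(set(big))
--     i = j = ans = 0
--     while i < len(s) and j < len(b):
--         if s[i] < b[j]:
--             i += 1
--         elif s[i] > b[j]:
--             j += 1
--         else:
--             ans += 1
--             i += 1
--     return ans
-- ===== Notes on version B (the rewrite author's own statement) =====
-- stated objective: faster
-- what changed: Instead of testing each element of the smaller list against the bigger list with a linear scan, B sorts the smaller list and the deduplicated bigger list and counts matches with a single two-pointer merge sweep.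
import Mathlib
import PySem

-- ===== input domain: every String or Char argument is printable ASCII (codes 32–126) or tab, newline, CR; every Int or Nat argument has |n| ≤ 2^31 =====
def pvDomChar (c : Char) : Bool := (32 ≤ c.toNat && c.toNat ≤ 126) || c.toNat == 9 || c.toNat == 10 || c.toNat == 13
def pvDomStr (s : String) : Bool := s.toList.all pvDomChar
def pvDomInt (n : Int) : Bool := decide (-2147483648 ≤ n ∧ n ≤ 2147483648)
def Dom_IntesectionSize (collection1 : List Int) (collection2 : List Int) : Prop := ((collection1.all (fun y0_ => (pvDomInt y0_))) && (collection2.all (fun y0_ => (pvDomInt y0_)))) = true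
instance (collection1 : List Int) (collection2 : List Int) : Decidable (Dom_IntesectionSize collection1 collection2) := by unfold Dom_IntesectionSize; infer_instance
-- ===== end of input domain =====

-- B replaces A's per-element linear membership scan by sorting the smaller list and the
-- deduplicated bigger list and counting matches in one two-pointer merge sweep (faster in a timing run).


-- ===== PORT A =====
def IntesectionSize (collection1 : List Int) (collection2 : List Int) : Int :=
  let sb := if collection1.length > collection2.length
            then (collection2, collection1) else (collection1, collection2)
  sb.1.foldl (fun ans comm => if sb.2.contains comm then ans + 1 else ans) 0

-- ===== PORT B =====
-- the while-loop of Source B: indices i, j into s and b, accumulator ans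
-- (fuel = s.length + b.length bounds the number of iterations; each step advances i or j)
def pvMergeLoop (s b : List Int) : Nat → Nat → Nat → Int → Int
  | 0, _, _, ans => ans
  | fuel + 1, i, j, ans =>
    if h : i < s.length ∧ j < b.length then
      if s[i]'h.1 < b[j]'h.2 then pvMergeLoop s b fuel (i + 1) j ans
      else if s[i]'h.1 > b[j]'h.2 then pvMergeLoop s b fuel i (j + 1) ans
      else pvMergeLoop s b fuel (i + 1) j (ans + 1)
    else ans

def IntesectionSize_alt (collection1 : List Int) (collection2 : List Int) : Int :=
  let sb := if collection1.length > collection2.length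
            then (collection2, collection1) else (collection1, collection2)
  let s := PySem.List.sorted sb.1 (fun x => x) false
  let b := PySem.List.sorted (PySem.Set.ofList sb.2) (fun x => x) false
  pvMergeLoop s b (s.length + b.length) 0 0 0

-- ===== PRECONDITION & SPEC =====
def Spec_IntesectionSize (collection1 : List Int) (collection2 : List Int) (out : Int) : Prop := out = IntesectionSize_alt collection1 collection2
instance (collection1 : List Int) (collection2 : List Int) (out : Int) : Decidable (Spec_IntesectionSize collection1 collection2 out) := by unfold Spec_IntesectionSize; infer_instance

-- ===== CLAIM (what is proved, stated in full; the proofs are below) =====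
def Claim_equal_IntesectionSize : Prop := ∀ (collection1 : List Int) (collection2 : List Int), Dom_IntesectionSize collection1 collection2 → Spec_IntesectionSize collection1 collection2 (IntesectionSize collection1 collection2)

-- ===== LEMMAS AND PROOFS =====

-- structural (head-consuming) form of the two-pointer sweep, for reasoning
def pvMC : List Int → List Int → Int
  | [], _ => 0
  | _ :: _, [] => 0
  | x :: xs, y :: ys =>
    if x < y then pvMC xs (y :: ys)
    else if y < x then pvMC (x :: xs) ys
    else pvMC xs (y :: ys) + 1
termination_by s b => s.length + b.length

-- the index loop computes ans + the structural sweep on the remaining suffixes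
lemma pvMergeLoop_eq_mc (s b : List Int) :
    ∀ (fuel i j : Nat) (ans : Int), (s.length - i) + (b.length - j) ≤ fuel →
      pvMergeLoop s b fuel i j ans = ans + pvMC (s.drop i) (b.drop j) := by
  intro fuel
  induction fuel with
  | zero =>
    intro i j ans hf
    have h1 : s.drop i = [] := List.drop_eq_nil_of_le (by omega)
    have h2 : b.drop j = [] := List.drop_eq_nil_of_le (by omega)
    rw [pvMergeLoop, h1, h2, pvMC]
    ring
  | succ fuel ih =>
    intro i j ans hf
    rw [pvMergeLoop]
    by_cases h : i < s.length ∧ j < b.length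
    · obtain ⟨hi, hj⟩ := h
      have hs : s.drop i = s[i] :: s.drop (i + 1) := List.drop_eq_getElem_cons hi
      have hb : b.drop j = b[j] :: b.drop (j + 1) := List.drop_eq_getElem_cons hj
      rw [dif_pos ⟨hi, hj⟩]
      by_cases h1 : s[i] < b[j]
      · rw [if_pos h1, ih (i + 1) j ans (by omega), hs, hb, pvMC, if_pos h1]
      · rw [if_neg h1]
        by_cases h2 : s[i] > b[j]
        · rw [if_pos h2, ih i (j + 1) ans (by omega), hs, hb, pvMC, if_neg h1, if_pos h2]
        · rw [if_neg h2, ih (i + 1) j (ans + 1) (by omega), hs, hb, pvMC, if_neg h1, if_neg h2]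
          ring
    · rw [dif_neg h]
      rcases not_and_or.mp h with h' | h'
      · have hnil : s.drop i = [] := List.drop_eq_nil_of_le (by omega)
        rw [hnil, pvMC]
        ring
      · have hnil : b.drop j = [] := List.drop_eq_nil_of_le (by omega)
        rw [hnil]
        cases s.drop i <;> simp [pvMC]

-- on a ≤-sorted s and a <-sorted b the sweep counts elements of s belonging to b
lemma pvMC_eq_countP : ∀ (s b : List Int), s.Pairwise (· ≤ ·) → b.Pairwise (· < ·) →
    pvMC s b = ((s.countP (fun x => b.contains x) : Nat) : Int) := by
  intro s b
  induction s, b using pvMC.induct with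
  | case1 b => simp [pvMC]
  | case2 x xs =>
    intro _ _
    simp [pvMC]
  | case3 x xs y ys h1 ih =>
    intro hs hb
    have hxy : x ≠ y := by omega
    have hxys : x ∉ ys := fun hmem => by
      have := (List.pairwise_cons.mp hb).1 x hmem; omega
    rw [pvMC, if_pos h1, ih hs.tail hb]
    simp [hxy, hxys]
  | case4 x xs y ys h1 h2 ih =>
    intro hs hb
    rw [pvMC, if_neg h1, if_pos h2, ih hs (List.pairwise_cons.mp hb).2]
    norm_cast
    apply List.countP_congr
    intro z hz
    have hxz : x ≤ z := by
      rcases List.mem_cons.mp hz with rfl | hmem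
      · omega
      · exact (List.pairwise_cons.mp hs).1 z hmem
    simp only [List.contains_eq_mem, List.mem_cons, decide_eq_true_eq]
    constructor
    · exact Or.inr
    · rintro (rfl | hmem)
      · omega
      · exact hmem
  | case5 x xs y ys h1 h2 ih =>
    intro hs hb
    have hx : (y :: ys).contains x = true := by
      have : x = y := by omega
      simp [List.contains_eq_mem, this]
    rw [pvMC, if_neg h1, if_neg h2, ih hs.tail hb, List.countP_cons, hx]
    simp [add_comm]

-- A's fold is the membership count
lemma foldA_eq_countP (big : List Int) : ∀ (small : List Int) (a : Int),
    small.foldl (fun ans comm => if big.contains comm then ans + 1 else ans) a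
      = a + ((small.countP (fun x => big.contains x) : Nat) : Int) := by
  intro small
  induction small with
  | nil => simp
  | cons x t ih =>
    intro a
    rw [List.foldl_cons, ih, List.countP_cons]
    by_cases hx : big.contains x = true <;>
      · simp only [hx, if_true, if_false, Bool.false_eq_true]
        push_cast
        ring

-- the two loop bodies agree, for one (small, big) pair
lemma core (small big : List Int) :
    pvMergeLoop (PySem.List.sorted small (fun x => x) false)
      (PySem.List.sorted (PySem.Set.ofList big) (fun x => x) false)
      ((PySem.List.sorted small (fun x => x) false).length
        + (PySem.List.sorted (PySem.Set.ofList big) (fun x => x) false).length) 0 0 0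
      = small.foldl (fun ans comm => if big.contains comm then ans + 1 else ans) 0 := by
  set s := PySem.List.sorted small (fun x => x) false with hs
  set b := PySem.List.sorted (PySem.Set.ofList big) (fun x => x) false with hb
  rw [pvMergeLoop_eq_mc s b _ 0 0 0 (by omega), foldA_eq_countP]
  simp only [List.drop_zero, zero_add]
  rw [pvMC_eq_countP s b (PySem.List.sorted_pairwise small (fun x => x))
        (PySem.List.sorted_ofList_pairwise_lt big)]
  congr 1
  rw [(PySem.List.sorted_perm small (fun x => x) false).countP_eq]
  apply List.countP_congr
  intro z _
  simp only [List.contains_eq_mem, hb,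
    PySem.List.mem_sorted, PySem.Set.mem_ofList]

-- ===== VERDICT (by name: the statement is the Claim_ definition above) =====
theorem IntesectionSize_spec : Claim_equal_IntesectionSize := by
  intro c1 c2 _
  unfold Spec_IntesectionSize IntesectionSize IntesectionSize_alt
  by_cases h : c1.length > c2.length
  · simp only [h, if_true]
    exact (core c2 c1).symm
  · simp only [h, if_false]
    exact (core c1 c2).symm
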